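-- pv_equiv track=rewrite | github.com/Gerukatmandu/krypto | Lab_5_hashing/Zad8.py | execute_calculation
-- ===== SOURCE A (Python) =====
-- def if_collisions(type_of_hasing, dict_of_hashes):
--     return True if len(set(dict_of_hashes[type_of_hasing])) != len(dict_of_hashes[type_of_hasing]) else False
--
-- def count_collisions(list_of_hashes):
--     return len(list_of_hashes) - len(set(list_of_hashes))
--
-- def execute_calculation(hashes_dict):
--     dict_of_collisions = {}
--     for key in hashes_dict.keys():
--         if if_collisions(key, hashes_dict):
--             dict_of_collisions[key] = count_collisions(hashes_dict[key])
--         else: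
--             dict_of_collisions[key] = 0
--     return dict_of_collisions
-- ===== SOURCE B (Python) =====
-- def execute_calculation(hashes_dict):
--     dict_of_collisions = {}
--     for key, hashes in hashes_dict.items():
--         ordered = sorted(hashes)
--         dict_of_collisions[key] = sum(1 for a, b in zip(ordered, ordered[1:]) if a == b)
--     return dict_of_collisions
-- ===== Notes on version B (the rewrite author's own statement) =====
-- stated objective: alternative
-- what changed: Replaces A's per-key set construction and length subtraction (len(list) - len(set(list)) behind an if/else helper pair) with sort-then-scan: sort each list and count adjacent equal neighbours, a genuinely different algorithm for counting duplicates.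
import Mathlib
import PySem

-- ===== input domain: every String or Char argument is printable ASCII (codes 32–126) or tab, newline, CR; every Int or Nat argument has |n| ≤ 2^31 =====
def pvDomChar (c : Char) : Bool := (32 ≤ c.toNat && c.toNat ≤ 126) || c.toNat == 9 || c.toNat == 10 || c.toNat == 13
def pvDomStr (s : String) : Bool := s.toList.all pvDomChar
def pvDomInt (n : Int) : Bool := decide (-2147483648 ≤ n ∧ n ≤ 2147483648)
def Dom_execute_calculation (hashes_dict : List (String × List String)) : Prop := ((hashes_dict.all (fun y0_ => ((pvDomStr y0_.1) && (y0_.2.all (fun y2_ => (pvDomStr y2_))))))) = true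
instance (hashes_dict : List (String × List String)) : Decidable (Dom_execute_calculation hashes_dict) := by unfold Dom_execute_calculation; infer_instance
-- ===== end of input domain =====

-- B replaces A's per-key set construction + length subtraction with sort-then-scan:
-- sort each list and count adjacent equal neighbours (objective: alternative; not faster).

-- shared input decoding: the Python parameter is a dict; build it from the association pairs
-- (insert overwrites in place, exactly Python's dict(pairs))
def toPyDict (hashes_dict : List (String × List String)) : PySem.Dict String (List String) :=
  hashes_dict.foldl (fun d p => d.insert p.1 p.2) PySem.Dict.empty

-- ===== PORT A =====
-- dict_of_hashes[type_of_hasing]: key always comes from .keys(), so the lookup never raises; getD is exact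
def if_collisions (type_of_hasing : String) (dict_of_hashes : PySem.Dict String (List String)) : Bool :=
  if (PySem.Set.ofList (dict_of_hashes.getD type_of_hasing [])).length ≠ (dict_of_hashes.getD type_of_hasing []).length then true else false

def count_collisions (list_of_hashes : List String) : Int :=
  (list_of_hashes.length : Int) - ((PySem.Set.ofList list_of_hashes).length : Int)

def execute_calculation (hashes_dict : List (String × List String)) : List (String × Int) :=
  let d := toPyDict hashes_dict
  (d.keys.foldl (fun (dict_of_collisions : PySem.Dict String Int) key =>
      if if_collisions key d then
        dict_of_collisions.insert key (count_collisions (d.getD key []))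
      else
        dict_of_collisions.insert key 0) PySem.Dict.empty).items

-- ===== PORT B =====
-- per key: ordered = sorted(hashes); sum(1 for a, b in zip(ordered, ordered[1:]) if a == b)
def execute_calculation_alt (hashes_dict : List (String × List String)) : List (String × Int) :=
  let d := toPyDict hashes_dict
  (d.items.foldl (fun (dict_of_collisions : PySem.Dict String Int) kv =>
      let ordered := PySem.List.sorted kv.2 (fun x => x) false
      dict_of_collisions.insert kv.1
        ((((ordered.zip (PySem.List.slice ordered (some 1) none)).filter
            (fun p => p.1 == p.2)).map (fun _ => (1 : Int))).sum)) PySem.Dict.empty).items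

-- ===== PRECONDITION & SPEC =====
def Spec_execute_calculation (hashes_dict : List (String × List String)) (out : List (String × Int)) : Prop := out = execute_calculation_alt hashes_dict
instance (hashes_dict : List (String × List String)) (out : List (String × Int)) : Decidable (Spec_execute_calculation hashes_dict out) := by unfold Spec_execute_calculation; infer_instance

-- ===== CLAIM (what is proved, stated in full; the proofs are below) =====
def Claim_equal_execute_calculation : Prop := ∀ (hashes_dict : List (String × List String)), Dom_execute_calculation hashes_dict → Spec_execute_calculation hashes_dict (execute_calculation hashes_dict)

-- ===== LEMMAS AND PROOFS =====

-- adjacent equal pairs of a ≤-sorted list count exactly its duplicates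
theorem adj_card_of_pairwise (ys : List String) (h : ys.Pairwise (· ≤ ·)) :
    ((ys.zip ys.tail).filter (fun p => p.1 == p.2)).length + ys.toFinset.card = ys.length := by
  induction ys with
  | nil => simp
  | cons a t ih =>
    cases t with
    | nil => simp
    | cons b t' =>
      have ht : (b :: t').Pairwise (· ≤ ·) := h.tail
      have hab : a ≤ b := (List.pairwise_cons.mp h).1 b (by simp)
      have ih' := ih ht
      simp only [List.tail_cons, List.toFinset_cons, List.length_cons] at ih'
      by_cases hiff : a = b
      · subst hiff
        simp only [List.zip_cons_cons, List.tail_cons, List.filter_cons, beq_self_eq_true,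
          if_true, List.length_cons, List.toFinset_cons, Finset.insert_idem]
        omega
      · have hnotmem : a ∉ (b :: t') := by
          intro hmem
          rcases List.mem_cons.mp hmem with h1 | h2
          · exact hiff h1
          · have hbl : b ≤ a := le_trans ((List.pairwise_cons.mp ht).1 a h2) (le_refl a)
            exact hiff (le_antisymm hab hbl)
        have hnm : a ∉ insert b t'.toFinset := by
          simpa [List.toFinset_cons] using (by simpa [List.mem_toFinset] using hnotmem : a ∉ (b :: t').toFinset)
        simp only [List.zip_cons_cons, List.tail_cons, List.filter_cons]
        rw [if_neg (by simpa using hiff)]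
        simp only [List.toFinset_cons, List.length_cons]
        rw [Finset.card_insert_of_notMem hnm]
        omega

-- set(xs) has as many elements as xs.toFinset
theorem ofList_length_eq_card (xs : List String) :
    (PySem.Set.ofList xs).length = xs.toFinset.card := by
  have hnd : (PySem.Set.ofList xs).Nodup := PySem.Set.nodup_ofList xs
  have hfe : (PySem.Set.ofList xs).toFinset = xs.toFinset := by
    ext x
    simp [List.mem_toFinset, PySem.Set.mem_ofList]
  rw [← List.toFinset_card_of_nodup hnd, hfe]

-- B's per-key value equals A's count_collisions
theorem perkey_alt_eq_count (xs : List String) :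
    ((((PySem.List.sorted xs (fun x => x) false).zip
        (PySem.List.slice (PySem.List.sorted xs (fun x => x) false) (some 1) none)).filter
        (fun p => p.1 == p.2)).map (fun _ => (1 : Int))).sum = count_collisions xs := by
  set ys := PySem.List.sorted xs (fun x => x) false with hys
  have hperm : ys.Perm xs := PySem.List.sorted_perm xs (fun x => x) false
  have hpw : ys.Pairwise (· ≤ ·) := by
    simpa using PySem.List.sorted_pairwise xs (fun x => x)
  have hadj := adj_card_of_pairwise ys hpw
  have hsum : ((((ys.zip ys.tail).filter (fun p => p.1 == p.2)).map
      (fun _ => (1 : Int))).sum)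
      = (((ys.zip ys.tail).filter (fun p => p.1 == p.2)).length : Int) := by
    simpa using PySem.List.sum_map_const_int
      ((ys.zip ys.tail).filter (fun p => p.1 == p.2)) 1
  have hfe : ys.toFinset = xs.toFinset := by
    ext x; simp [hperm.mem_iff]
  rw [PySem.List.slice_from_one, hsum]
  unfold count_collisions
  rw [ofList_length_eq_card, ← hfe, ← hperm.length_eq]
  omega

-- A's per-key if/else also computes count_collisions (the else branch fires exactly when it is 0)
theorem perkey_eq_count (key : String) (d : PySem.Dict String (List String)) :
    (if if_collisions key d then count_collisions (d.getD key []) else (0 : Int))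
      = count_collisions (d.getD key []) := by
  unfold if_collisions count_collisions
  split_ifs with h1 h2 h3 <;> simp_all

theorem execute_calculation_eq (hashes_dict : List (String × List String)) :
    execute_calculation hashes_dict = execute_calculation_alt hashes_dict := by
  unfold execute_calculation execute_calculation_alt
  set d := toPyDict hashes_dict with hd
  have hnd : d.keys.Nodup := by
    have := PySem.Dict.nodup_keys_foldl_insert_key hashes_dict Prod.fst
      (fun d p => p.2) PySem.Dict.empty (by simp)
    simpa [hd, toPyDict] using this
  -- A-side: the if/else loop is a plain insert loop of count_collisions
  have hA : (d.keys.foldl (fun (out : PySem.Dict String Int) key =>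
        if if_collisions key d then out.insert key (count_collisions (d.getD key []))
        else out.insert key 0) PySem.Dict.empty).items
      = d.keys.map (fun key => (key, count_collisions (d.getD key []))) := by
    have hcongr : (d.keys.foldl (fun (out : PySem.Dict String Int) key =>
          if if_collisions key d then out.insert key (count_collisions (d.getD key []))
          else out.insert key 0) PySem.Dict.empty)
        = d.keys.foldl (fun (out : PySem.Dict String Int) key =>
          out.insert key (count_collisions (d.getD key []))) PySem.Dict.empty := by
      apply PySem.List.foldl_congr_mem
      intro acc k _
      by_cases hcol : if_collisions k d = true
      · simp [hcol]
      · have h0 := perkey_eq_count k d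
        rw [if_neg hcol] at h0
        rw [if_neg hcol, ← h0]
    rw [hcongr]
    have := PySem.Dict.items_foldl_insert_fresh (l := d.keys) (k := fun key => key)
      (v := fun key => count_collisions (d.getD key [])) (d := PySem.Dict.empty)
      (by intro a _; simp) (by simpa using hnd)
    simpa using this
  -- B-side: the insert loop over items appends per-item sort-and-count values
  have hB : (d.items.foldl (fun (out : PySem.Dict String Int) kv =>
        out.insert kv.1 ((((PySem.List.sorted kv.2 (fun x => x) false).zip
          (PySem.List.slice (PySem.List.sorted kv.2 (fun x => x) false) (some 1) none)).filter
          (fun p => p.1 == p.2)).map (fun _ => (1 : Int))).sum) PySem.Dict.empty).items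
      = d.items.map (fun kv => (kv.1, ((((PySem.List.sorted kv.2 (fun x => x) false).zip
          (PySem.List.slice (PySem.List.sorted kv.2 (fun x => x) false) (some 1) none)).filter
          (fun p => p.1 == p.2)).map (fun _ => (1 : Int))).sum)) := by
    have := PySem.Dict.items_foldl_insert_fresh (l := d.items) (k := Prod.fst)
      (v := fun kv => ((((PySem.List.sorted kv.2 (fun x => x) false).zip
          (PySem.List.slice (PySem.List.sorted kv.2 (fun x => x) false) (some 1) none)).filter
          (fun p => p.1 == p.2)).map (fun _ => (1 : Int))).sum) (d := PySem.Dict.empty)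
      (by intro a _; simp) (by simpa [PySem.Dict.keys] using hnd)
    simpa using this
  simp only [hA, hB]
  rw [PySem.Dict.items_eq_map_keys d hnd []]
  simp only [List.map_map]
  apply List.map_congr_left
  intro k _
  simp only [Function.comp_apply]
  rw [perkey_alt_eq_count]

-- ===== VERDICT (by name: the statement is the Claim_ definition above) =====
theorem execute_calculation_spec : Claim_equal_execute_calculation := by
  intro hashes_dict _
  unfold Spec_execute_calculation
  exact execute_calculation_eq hashes_dict
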